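-- pv_equiv track=rewrite | github.com/aalpkk/nox-project | agent/scanner_reader.py | get_latest_date_signals
-- ===== SOURCE A (Python) =====
-- def get_latest_date_signals(signals):
--     """Her screener'in en son tarihli sinyallerini dondur."""
--     if not signals:
--         return []
--     latest_by_screener = {}
--     for s in signals:
--         scr = s['screener']
--         d = s.get('csv_date', '')
--         if scr not in latest_by_screener or d > latest_by_screener[scr]:
--             latest_by_screener[scr] = d
--     return [s for s in signals
--             if s.get('csv_date', '') == latest_by_screener.get(s['screener'], '')]
-- ===== SOURCE B (Python) =====
-- def get_latest_date_signals(signals):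
--     """Her screener'in en son tarihli sinyallerini dondur."""
--     return [s for s in signals
--             if not any(t['screener'] == s['screener']
--                        and t.get('csv_date', '') > s.get('csv_date', '')
--                        for t in signals)]
-- ===== Notes on version B (the rewrite author's own statement) =====
-- stated objective: alternative
-- what changed: A builds a running-max latest-date dict per screener and then filters; B uses no dict or max at all: a pairwise dominance test keeps a signal iff no signal of the same screener has a strictly later date.
import Mathlib
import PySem

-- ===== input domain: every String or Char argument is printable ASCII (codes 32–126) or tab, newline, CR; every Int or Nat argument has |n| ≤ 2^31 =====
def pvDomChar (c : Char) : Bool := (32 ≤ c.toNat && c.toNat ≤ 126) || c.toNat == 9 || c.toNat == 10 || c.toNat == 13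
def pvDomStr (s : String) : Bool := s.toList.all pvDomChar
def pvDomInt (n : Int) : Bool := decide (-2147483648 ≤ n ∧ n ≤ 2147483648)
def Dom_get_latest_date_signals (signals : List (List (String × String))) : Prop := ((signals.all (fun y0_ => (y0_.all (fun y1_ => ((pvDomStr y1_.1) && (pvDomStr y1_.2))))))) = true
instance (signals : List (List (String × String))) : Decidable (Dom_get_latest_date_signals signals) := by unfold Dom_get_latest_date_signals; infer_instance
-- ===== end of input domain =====

-- ===== PORT A =====
-- B replaces A's latest-date dict entirely by a pairwise dominance test (no dict, no max):
-- keep a signal iff no signal of the same screener has a strictly later date. Same return value.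
-- Shared transliteration of the dict lookups both Pythons perform on a signal:
-- s['screener'] (the KeyError on a missing key is excluded by Pre_) and s.get('csv_date', '').
def scrOf (s : List (String × String)) : String := (PySem.Dict.mk s).getD "screener" ""
def dateOf (s : List (String × String)) : String := (PySem.Dict.mk s).getD "csv_date" ""

def get_latest_date_signals (signals : List (List (String × String))) : List (List (String × String)) :=
  if signals = [] then []
  else
    let latest := signals.foldl (fun latest s =>
      let scr := scrOf s
      let d := dateOf s
      if !latest.contains scr || decide (latest.getD scr "" < d) then latest.insert scr d
      else latest) PySem.Dict.empty
    signals.filter (fun s => dateOf s == latest.getD (scrOf s) "")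

-- ===== PORT B =====
def get_latest_date_signals_alt (signals : List (List (String × String))) : List (List (String × String)) :=
  signals.filter (fun s =>
    !(signals.any (fun t => scrOf t == scrOf s && decide (dateOf s < dateOf t))))

-- ===== PRECONDITION & SPEC =====
-- Pre_ excludes exactly the inputs on which the Python A raises KeyError (B raises there too):
-- a signal dict without a 'screener' key.
def Pre_get_latest_date_signals (signals : List (List (String × String))) : Prop :=
  ∀ s ∈ signals, "screener" ∈ s.map Prod.fst
instance (signals : List (List (String × String))) : Decidable (Pre_get_latest_date_signals signals) := by unfold Pre_get_latest_date_signals; infer_instance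

def pvWitness_get_latest_date_signals : (List (List (String × String))) :=
  [[("screener", "x"), ("csv_date", "2024-01-02")], [("screener", "x")]]

def Spec_get_latest_date_signals (signals : List (List (String × String))) (out : List (List (String × String))) : Prop := out = get_latest_date_signals_alt signals
instance (signals : List (List (String × String))) (out : List (List (String × String))) : Decidable (Spec_get_latest_date_signals signals out) := by unfold Spec_get_latest_date_signals; infer_instance

-- ===== CLAIM (what is proved, stated in full; the proofs are below) =====
def Claim_equal_get_latest_date_signals : Prop := ∀ (signals : List (List (String × String))), Dom_get_latest_date_signals signals → Pre_get_latest_date_signals signals → Spec_get_latest_date_signals signals (get_latest_date_signals signals)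

-- ===== LEMMAS AND PROOFS =====

-- the running-max step on an optional current best (Python string comparison = Lean's <)
def maxStep (o : Option String) (d : String) : Option String :=
  match o with
  | none => some d
  | some m => if m < d then some d else some m

-- A's fold, restricted to one key, is a running max over that screener's dates
lemma aFold_get? (l : List (List (String × String))) (acc : PySem.Dict String String) (scr : String) :
    (l.foldl (fun latest s =>
      let sc := scrOf s
      let d := dateOf s
      if !latest.contains sc || decide (latest.getD sc "" < d) then latest.insert sc d
      else latest) acc).get? scr
    = ((l.filter (fun s => scrOf s == scr)).map dateOf).foldl maxStep (acc.get? scr) := by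
  induction l generalizing acc with
  | nil => rfl
  | cons a l ih =>
    rw [List.foldl_cons, ih]
    by_cases hsc : scrOf a = scr
    · have hf : List.filter (fun s => scrOf s == scr) (a :: l)
          = a :: List.filter (fun s => scrOf s == scr) l := by
        simp [hsc]
      rw [hf, List.map_cons, List.foldl_cons]
      subst hsc
      have hstep : (let sc := scrOf a
          let d := dateOf a
          if !acc.contains sc || decide (acc.getD sc "" < d) then acc.insert sc d
          else acc).get? (scrOf a) = maxStep (acc.get? (scrOf a)) (dateOf a) := by
        cases hget : acc.get? (scrOf a) with
        | none =>
          have hc : acc.contains (scrOf a) = false := by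
            rw [PySem.Dict.contains_eq_isSome_get?, hget]; rfl
          simp [hc, maxStep, PySem.Dict.get?_insert_self]
        | some m =>
          have hc : acc.contains (scrOf a) = true := by
            rw [PySem.Dict.contains_eq_isSome_get?, hget]; rfl
          have hgd : acc.getD (scrOf a) "" = m := PySem.Dict.getD_of_get?_eq_some acc "" hget
          by_cases hlt : m < dateOf a
          · simp [hc, hgd, hlt, maxStep, PySem.Dict.get?_insert_self]
          · simp [hc, hgd, hlt, maxStep, hget]
      rw [hstep]
    · have hf : List.filter (fun s => scrOf s == scr) (a :: l)
          = List.filter (fun s => scrOf s == scr) l := by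
        simp [hsc]
      rw [hf]
      have hstep : (let sc := scrOf a
          let d := dateOf a
          if !acc.contains sc || decide (acc.getD sc "" < d) then acc.insert sc d
          else acc).get? scr = acc.get? scr := by
        simp only []
        split
        · exact PySem.Dict.get?_insert_of_ne _ _ (Ne.symm hsc)
        · rfl
      rw [hstep]

-- running max over a some-accumulator produces an attained upper bound
lemma foldl_maxStep_some (l : List String) (m : String) :
    ∃ m', l.foldl maxStep (some m) = some m' ∧ (m' = m ∨ m' ∈ l) ∧ m ≤ m' ∧ ∀ x ∈ l, x ≤ m' := by
  induction l generalizing m with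
  | nil => exact ⟨m, rfl, Or.inl rfl, le_refl _, by simp⟩
  | cons a l ih =>
    rw [List.foldl_cons]
    by_cases h : m < a
    · obtain ⟨m', h1, h2, h3, h4⟩ := ih a
      refine ⟨m', by simpa [maxStep, h] using h1, ?_, le_of_lt (lt_of_lt_of_le h h3), ?_⟩
      · rcases h2 with h2 | h2
        · exact Or.inr (by simp [h2])
        · exact Or.inr (by simp [h2])
      · intro x hx
        rcases List.mem_cons.mp hx with rfl | hx
        · exact h3
        · exact h4 x hx
    · obtain ⟨m', h1, h2, h3, h4⟩ := ih m
      refine ⟨m', by simpa [maxStep, h] using h1, ?_, h3, ?_⟩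
      · rcases h2 with h2 | h2
        · exact Or.inl h2
        · exact Or.inr (by simp [h2])
      · intro x hx
        rcases List.mem_cons.mp hx with rfl | hx
        · exact le_trans (le_of_not_gt h) h3
        · exact h4 x hx

lemma ports_agree (signals : List (List (String × String))) :
    get_latest_date_signals signals = get_latest_date_signals_alt signals := by
  unfold get_latest_date_signals get_latest_date_signals_alt
  by_cases hnil : signals = []
  · simp [hnil]
  · rw [if_neg hnil]
    apply List.filter_congr
    intro s hs
    -- characterise A's latest date for scrOf s as the running max over the group's dates
    set grpd := ((signals.filter (fun t => scrOf t == scrOf s)).map dateOf) with hgrpd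
    have hmemg : dateOf s ∈ grpd := by
      exact List.mem_map_of_mem (List.mem_filter.mpr ⟨hs, by simp⟩)
    obtain ⟨g0, gl, hgl⟩ : ∃ g0 gl, grpd = g0 :: gl := by
      cases h : grpd with
      | nil => rw [h] at hmemg; simp at hmemg
      | cons a b => exact ⟨a, b, rfl⟩
    obtain ⟨M, hM1, hM2, hM3, hM4⟩ := foldl_maxStep_some gl g0
    have hget : (signals.foldl (fun latest t =>
        let scr := scrOf t
        let d := dateOf t
        if !latest.contains scr || decide (latest.getD scr "" < d) then latest.insert scr d
        else latest) PySem.Dict.empty).get? (scrOf s) = some M := by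
      rw [aFold_get?, PySem.Dict.get?_empty, ← hgrpd, hgl, List.foldl_cons]
      exact hM1
    have hgd : (signals.foldl (fun latest t =>
        let scr := scrOf t
        let d := dateOf t
        if !latest.contains scr || decide (latest.getD scr "" < d) then latest.insert scr d
        else latest) PySem.Dict.empty).getD (scrOf s) "" = M :=
      PySem.Dict.getD_of_get?_eq_some _ "" hget
    rw [hgd]
    -- M is an upper bound of grpd attained in grpd
    have hub : ∀ x ∈ grpd, x ≤ M := by
      intro x hx
      rw [hgl] at hx
      rcases List.mem_cons.mp hx with rfl | hx
      · exact hM3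
      · exact hM4 x hx
    -- now a Bool equality: date == max  ↔  no same-screener signal strictly later
    have hsle : dateOf s ≤ M := hub _ hmemg
    by_cases heq : dateOf s = M
    · have : (signals.any (fun t => scrOf t == scrOf s && decide (dateOf s < dateOf t))) = false := by
        rw [List.any_eq_false]
        intro t ht
        simp only [Bool.and_eq_true, beq_iff_eq, decide_eq_true_eq, not_and]
        intro hsc hlt
        have : dateOf t ≤ M := hub _ (List.mem_map_of_mem (List.mem_filter.mpr ⟨ht, by simp [hsc]⟩))
        rw [heq] at hlt
        exact absurd (lt_of_lt_of_le hlt this) (lt_irrefl M)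
      rw [this]
      simpa using heq
    · have hlt : dateOf s < M := lt_of_le_of_ne hsle heq
      have hMin : M ∈ grpd := by
        rw [hgl]
        rcases hM2 with rfl | h
        · exact List.mem_cons_self ..
        · exact List.mem_cons_of_mem _ h
      obtain ⟨t, ht, hdt⟩ := List.mem_map.mp (by rw [hgrpd] at hMin; exact hMin)
      have ht' := List.mem_filter.mp ht
      have : (signals.any (fun t => scrOf t == scrOf s && decide (dateOf s < dateOf t))) = true := by
        rw [List.any_eq_true]
        refine ⟨t, ht'.1, ?_⟩
        simp only [Bool.and_eq_true, beq_iff_eq, decide_eq_true_eq]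
        exact ⟨by simpa using ht'.2, by rw [hdt]; exact hlt⟩
      rw [this]
      simpa using heq

-- ===== VERDICT (by name: the statement is the Claim_ definition above) =====
theorem get_latest_date_signals_spec : Claim_equal_get_latest_date_signals := by
  intro signals _ _
  unfold Spec_get_latest_date_signals
  exact ports_agree signals
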